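-- pv_equiv track=rewrite | github.com/tos-kamiya/zombie-escape | scripts/floor_barcode_preview.py | encode_stage_barcode
-- ===== SOURCE A (Python) =====
-- def encode_stage_barcode(stage_number: int) -> str:
--     value = max(0, int(stage_number))
--     bits = bin(value)[2:]
--     one_count = bits.count("1")
--     parity_bit = "0" if (one_count % 2 == 0) else "1"
--
--     start = "**_"
--     end = "_**"
--     encoded_bits = "".join("_*" if bit == "0" else "*_" for bit in bits)
--     encoded_parity = "_*" if parity_bit == "0" else "*_"
--     return start + encoded_bits + encoded_parity + end
-- ===== SOURCE B (Python) =====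
-- def encode_stage_barcode(stage_number: int) -> str:
--     n = max(0, int(stage_number))
--     # Extract binary digits arithmetically (LSB first), tracking parity with a running XOR.
--     digits = []
--     parity = 0
--     if n == 0:
--         digits = [0]
--     else:
--         while n > 0:
--             d = n % 2
--             digits.append(d)
--             parity ^= d
--             n //= 2
--     digits.reverse()  # MSB first
--     cells = []
--     for d in digits:
--         cells.append("*_" if d == 1 else "_*")
--     return "**_" + "".join(cells) + ("_*" if parity == 0 else "*_") + "_**"
-- ===== Notes on version B (the rewrite author's own statement) =====
-- stated objective: alternative
-- what changed: B extracts binary digits arithmetically (n%2 / n//=2 loop with a running XOR for parity, then a reversal to MSB-first) instead of A's bin() string formatting and substring '1'-count.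
import Mathlib
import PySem

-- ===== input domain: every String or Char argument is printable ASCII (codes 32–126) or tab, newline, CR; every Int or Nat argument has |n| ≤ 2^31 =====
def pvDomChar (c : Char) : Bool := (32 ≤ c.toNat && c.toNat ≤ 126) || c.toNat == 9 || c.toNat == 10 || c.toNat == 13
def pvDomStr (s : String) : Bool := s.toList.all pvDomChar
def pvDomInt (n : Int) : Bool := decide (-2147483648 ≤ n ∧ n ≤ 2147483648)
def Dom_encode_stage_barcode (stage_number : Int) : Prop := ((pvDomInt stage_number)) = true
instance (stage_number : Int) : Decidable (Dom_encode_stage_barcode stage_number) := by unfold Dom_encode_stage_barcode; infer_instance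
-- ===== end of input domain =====

-- B replaces A's bin()-string formatting and '1'-substring count by arithmetic digit
-- extraction (n%2 / n//2 loop, running XOR parity, reversal to MSB-first); alternative, not faster.

-- ===== PORT A =====
-- bin(n)[2:] for n ≥ 0: binary digits MSB-first, "0" for zero (exact port of Python's bin on Nat)
def pvBinAux (n : Nat) : List Char :=
  if h : n = 0 then []
  else pvBinAux (n / 2) ++ [if n % 2 = 1 then '1' else '0']
decreasing_by exact Nat.div_lt_self (Nat.pos_of_ne_zero h) (by omega)

def pvBin (n : Nat) : List Char := if n = 0 then ['0'] else pvBinAux n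

def encode_stage_barcode (stage_number : Int) : String :=
  let value : Int := max 0 stage_number
  let bits : List Char := pvBin value.toNat   -- bits = bin(value)[2:]; value ≥ 0 always
  let one_count : Nat := bits.count '1'
  let parity_bit : Char := if one_count % 2 = 0 then '0' else '1'
  let start : List Char := ['*', '*', '_']
  let stop : List Char := ['_', '*', '*']
  let encoded_bits : List Char :=
    (bits.map (fun bit => if bit = '0' then ['_', '*'] else ['*', '_'])).flatten
  let encoded_parity : List Char := if parity_bit = '0' then ['_', '*'] else ['*', '_']
  String.mk (start ++ encoded_bits ++ encoded_parity ++ stop)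

-- ===== PORT B =====
-- the while-loop of Source B as structural recursion: (digits LSB-first, running XOR parity)
def pvBitsAux (n : Nat) : List Nat × Nat :=
  if h : n = 0 then ([], 0)
  else
    let d := n % 2
    let rest := pvBitsAux (n / 2)
    (d :: rest.1, d ^^^ rest.2)
decreasing_by exact Nat.div_lt_self (Nat.pos_of_ne_zero h) (by omega)

def encode_stage_barcode_alt (stage_number : Int) : String :=
  let n : Nat := (max 0 stage_number).toNat
  let dp : List Nat × Nat := if n = 0 then ([0], 0) else pvBitsAux n
  let digits : List Nat := dp.1.reverse   -- MSB first
  let cells : List (List Char) := digits.map (fun d => if d = 1 then ['*', '_'] else ['_', '*'])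
  String.mk (['*', '*', '_'] ++ cells.flatten ++
    (if dp.2 = 0 then ['_', '*'] else ['*', '_']) ++ ['_', '*', '*'])

-- ===== PRECONDITION & SPEC =====
def Spec_encode_stage_barcode (stage_number : Int) (out : String) : Prop := out = encode_stage_barcode_alt stage_number
instance (stage_number : Int) (out : String) : Decidable (Spec_encode_stage_barcode stage_number out) := by unfold Spec_encode_stage_barcode; infer_instance

-- ===== CLAIM (what is proved, stated in full; the proofs are below) =====
def Claim_equal_encode_stage_barcode : Prop := ∀ (stage_number : Int), Dom_encode_stage_barcode stage_number → Spec_encode_stage_barcode stage_number (encode_stage_barcode stage_number)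

-- ===== LEMMAS AND PROOFS =====

-- A's bin-string is B's digit list, reversed and rendered as characters
lemma pvBinAux_eq_bits (n : Nat) :
    pvBinAux n = (pvBitsAux n).1.reverse.map (fun d => if d = 1 then '1' else '0') := by
  induction n using Nat.strong_induction_on with
  | _ n ih =>
    by_cases h : n = 0
    · subst h; simp [pvBinAux, pvBitsAux]
    · rw [pvBinAux, pvBitsAux]
      simp only [h]
      rw [ih (n / 2) (Nat.div_lt_self (Nat.pos_of_ne_zero h) (by omega))]
      rcases Nat.mod_two_eq_zero_or_one n with h2 | h2 <;> simp [h2]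

-- B's running XOR parity is the count of 1-digits mod 2
lemma pvBitsAux_parity (n : Nat) :
    (pvBitsAux n).2 = (pvBitsAux n).1.count 1 % 2 := by
  induction n using Nat.strong_induction_on with
  | _ n ih =>
    by_cases h : n = 0
    · subst h; simp [pvBitsAux]
    · rw [pvBitsAux]
      simp only [h]
      have ihh := ih (n / 2) (Nat.div_lt_self (Nat.pos_of_ne_zero h) (by omega))
      rcases Nat.mod_two_eq_zero_or_one n with h2 | h2 <;>
        rcases Nat.mod_two_eq_zero_or_one ((pvBitsAux (n / 2)).1.count 1) with h3 | h3 <;>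
        simp [h2, ihh, h3] <;> omega

-- core equality as a function of the (common) nonnegative value n
lemma pv_core (n : Nat) :
    String.mk (['*', '*', '_'] ++
        ((pvBin n).map (fun bit => if bit = '0' then ['_', '*'] else ['*', '_'])).flatten ++
        (if (if (pvBin n).count '1' % 2 = 0 then '0' else '1') = '0'
          then ['_', '*'] else ['*', '_']) ++ ['_', '*', '*'])
      = String.mk (['*', '*', '_'] ++
        (((if n = 0 then ([0], 0) else pvBitsAux n).1.reverse.map
            (fun d => if d = 1 then ['*', '_'] else ['_', '*'])).flatten) ++
        (if (if n = 0 then ([0], 0) else pvBitsAux n).2 = 0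
          then ['_', '*'] else ['*', '_']) ++ ['_', '*', '*']) := by
  by_cases h : n = 0
  · subst h; decide
  · simp only [pvBin, h, if_false, pvBinAux_eq_bits n, List.map_map]
    have hmap : ((fun bit => if bit = '0' then ['_', '*'] else ['*', '_']) ∘
        (fun d : Nat => if d = 1 then '1' else '0'))
        = (fun d : Nat => if d = 1 then ['*', '_'] else ['_', '*']) := by
      funext d; by_cases hd : d = 1 <;> simp [hd, Function.comp]
    have hc : ((pvBitsAux n).1.reverse.map
        (fun d => if d = 1 then '1' else '0')).count '1' = (pvBitsAux n).1.count 1 := by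
      simp only [List.count_eq_countP, List.countP_map, List.countP_reverse]
      apply List.countP_congr
      intro d _
      by_cases hd : d = 1 <;> simp [hd, Function.comp]
    rw [hmap, hc, pvBitsAux_parity n]
    rcases Nat.mod_two_eq_zero_or_one ((pvBitsAux n).1.count 1) with h2 | h2 <;> simp [h2]

-- ===== VERDICT (by name: the statement is the Claim_ definition above) =====
theorem encode_stage_barcode_spec : Claim_equal_encode_stage_barcode := by
  intro s _
  unfold Spec_encode_stage_barcode encode_stage_barcode encode_stage_barcode_alt
  exact pv_core (max 0 s).toNat
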